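-- pv_equiv track=rewrite | github.com/ekeilty17/Personal-Projects-In-Python | Math/Linear Algebra/Old/GE_old.py | isLeadsInOrder
-- ===== SOURCE A (Python) =====
-- def isLeadsInOrder(A):
--     #checking that the leading entries go from right to left top to bottom
--     curr = -1
--     for row in A:
--         for c in range(0,len(row)-1):
--             if row[c] != 0:
--                 if c > curr:
--                     curr = c
--                     break
--                 else:
--                     return False
--     return True
-- ===== SOURCE B (Python) =====
-- def isLeadsInOrder(A):
--     # pass 1: collect the leading-column index of each row (scanning row[:-1]); rows with no lead are skipped
--     leads = []
--     for row in A: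
--         for c, x in enumerate(row[:len(row) - 1]):
--             if x != 0:
--                 leads.append(c)
--                 break
--     # pass 2: the collected lead columns must be strictly increasing
--     return all(a < b for a, b in zip(leads, leads[1:]))
-- ===== Notes on version B (the rewrite author's own statement) =====
-- stated objective: alternative
-- what changed: Replaces A's fused loop threading a 'curr' column through early returns by two separate passes: first extract each row's leading-column index into a list, then check that list is strictly increasing with a zip-based adjacent comparison.
import Mathlib
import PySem

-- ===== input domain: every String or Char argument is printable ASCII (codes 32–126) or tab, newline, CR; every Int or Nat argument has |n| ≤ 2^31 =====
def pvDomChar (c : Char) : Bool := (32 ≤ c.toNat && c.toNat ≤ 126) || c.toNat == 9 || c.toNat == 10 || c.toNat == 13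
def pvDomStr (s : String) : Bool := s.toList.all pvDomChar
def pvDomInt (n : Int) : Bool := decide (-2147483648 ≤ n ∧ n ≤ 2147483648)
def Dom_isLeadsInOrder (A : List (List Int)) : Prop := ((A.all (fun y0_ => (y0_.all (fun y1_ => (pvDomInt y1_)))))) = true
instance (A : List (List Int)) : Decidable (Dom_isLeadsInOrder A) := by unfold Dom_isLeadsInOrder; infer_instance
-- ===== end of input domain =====

-- B re-implements A as two passes (extract lead columns, then check strict increase) instead of
-- one fused loop threading `curr`; same cost, different decomposition ("alternative").

-- ===== PORT A =====
-- inner loop `for c in range(0, len(row)-1)`: none = `return False`,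
-- some none = loop fell through, some (some c) = `curr = c; break`.
-- `row[c]` is always in range here (0 ≤ c < len(row)-1), so pyGetD's default 0 is never used.
def pvInnerA (row : List Int) (curr : Int) : List Int → Option (Option Int)
  | [] => some none
  | c :: cs =>
    if PySem.List.pyGetD row c 0 ≠ 0 then
      if c > curr then some (some c) else none
    else pvInnerA row curr cs

def pvRowsA : List (List Int) → Int → Bool
  | [], _ => true
  | row :: rest, curr =>
    match pvInnerA row curr (PySem.List.pyRange 0 ((row.length : Int) - 1) 1) with
    | none => false
    | some none => pvRowsA rest curr
    | some (some c) => pvRowsA rest c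

def isLeadsInOrder (A : List (List Int)) : Bool := pvRowsA A (-1)

-- ===== PORT B =====
-- `for c, x in enumerate(row[:len(row)-1]): if x != 0: leads.append(c); break`
def pvLeadGo : List Int → Nat → Option Int
  | [], _ => none
  | x :: xs, c => if x ≠ 0 then some (c : Int) else pvLeadGo xs (c + 1)

def pvLead (row : List Int) : Option Int :=
  pvLeadGo (PySem.List.slice row none (some ((row.length : Int) - 1))) 0

def isLeadsInOrder_alt (A : List (List Int)) : Bool :=
  let leads := A.filterMap pvLead
  (leads.zip leads.tail).all (fun p => decide (p.1 < p.2))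

-- ===== PRECONDITION & SPEC =====
def Spec_isLeadsInOrder (A : List (List Int)) (out : Bool) : Prop := out = isLeadsInOrder_alt A
instance (A : List (List Int)) (out : Bool) : Decidable (Spec_isLeadsInOrder A out) := by unfold Spec_isLeadsInOrder; infer_instance

-- ===== CLAIM (what is proved, stated in full; the proofs are below) =====
def Claim_equal_isLeadsInOrder : Prop := ∀ (A : List (List Int)), Dom_isLeadsInOrder A → Spec_isLeadsInOrder A (isLeadsInOrder A)

-- ===== LEMMAS AND PROOFS =====

-- chain check: the shape A's fused loop follows once leads are extracted
def pvChain : Int → List Int → Bool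
  | _, [] => true
  | curr, c :: cs => if c > curr then pvChain c cs else false

theorem pvSlice_dropLast (row : List Int) :
    PySem.List.slice row none (some ((row.length : Int) - 1)) = row.dropLast := by
  cases row with
  | nil => simp [PySem.List.slice]
  | cons x xs =>
    have h : ((x :: xs).length : Int) - 1 = ((xs.length : Nat) : Int) := by
      simp
    rw [h, PySem.List.slice_to_natCast]
    simp [List.dropLast_eq_take]

theorem pvLeadGo_ge (l : List Int) (k : Nat) (c : Int) :
    pvLeadGo l k = some c → (k : Int) ≤ c := by
  induction l generalizing k with
  | nil => simp [pvLeadGo]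
  | cons x xs ih =>
    intro h
    rw [pvLeadGo] at h
    by_cases hx : x ≠ 0
    · rw [if_pos hx] at h
      injection h with h; omega
    · rw [if_neg hx] at h
      have := ih (k + 1) h
      push_cast at this; omega

theorem pvGet_dropLast (row : List Int) (k : Nat) (hk : k < row.dropLast.length) :
    PySem.List.pyGetD row (k : Int) 0 = row.dropLast[k] := by
  have hlen : k < row.length := by
    have := List.length_dropLast (xs := row); omega
  rw [List.getElem_dropLast]
  simp [PySem.List.pyGetD, PySem.List.pyGet?, PySem.List.pyIdx?, hlen]

theorem pvInner_eq (row : List Int) (curr : Int) (k : Nat) :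
    pvInnerA row curr (PySem.List.pyRange (k : Int) (row.dropLast.length : Int) 1) =
      match pvLeadGo (row.dropLast.drop k) k with
      | none => some none
      | some c => if c > curr then some (some c) else none := by
  by_cases hk : k < row.dropLast.length
  · rw [PySem.List.pyRange_one_cons (by exact_mod_cast hk),
      List.drop_eq_getElem_cons hk]
    by_cases hx : row.dropLast[k] ≠ 0
    · simp only [pvInnerA, pvLeadGo, pvGet_dropLast row k hk]
      split_ifs with hcur <;> simp [hcur]
    · simp only [pvInnerA, pvLeadGo, pvGet_dropLast row k hk, hx, ite_false]
      have hcast : (k : Int) + 1 = ((k + 1 : Nat) : Int) := by push_cast; ring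
      rw [hcast, pvInner_eq row curr (k + 1)]
  · rw [PySem.List.pyRange_one_eq_nil (by exact_mod_cast Nat.le_of_not_lt hk)]
    rw [List.drop_eq_nil_of_le (Nat.le_of_not_lt hk)]
    rfl
termination_by row.dropLast.length - k
decreasing_by
  omega

theorem pvRange_fix (row : List Int) :
    PySem.List.pyRange 0 ((row.length : Int) - 1) 1 =
      PySem.List.pyRange ((0 : Nat) : Int) (row.dropLast.length : Int) 1 := by
  cases row with
  | nil => rw [PySem.List.pyRange_one_eq_nil (by norm_num), PySem.List.pyRange_one_eq_nil (by norm_num)]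
  | cons x xs => norm_num [List.length_dropLast]

theorem pvRows_eq (A : List (List Int)) (curr : Int) :
    pvRowsA A curr = pvChain curr (A.filterMap pvLead) := by
  induction A generalizing curr with
  | nil => rfl
  | cons row rest ih =>
    have hlead : pvLead row = pvLeadGo row.dropLast 0 := by
      rw [pvLead, pvSlice_dropLast]
    have hinner := pvInner_eq row curr 0
    simp only [List.drop_zero] at hinner
    rw [pvRowsA, pvRange_fix row, hinner]
    cases h : pvLeadGo row.dropLast 0 with
    | none => simp [hlead, h, ih]
    | some c =>
      by_cases hc : c > curr
      · simp [hlead, h, hc, ih, pvChain]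
      · simp [hlead, h, hc, pvChain]

theorem pvZip_chain (c : Int) (cs : List Int) :
    ((c :: cs).zip cs).all (fun p => decide (p.1 < p.2)) = pvChain c cs := by
  induction cs generalizing c with
  | nil => rfl
  | cons d ds ih =>
    simp only [List.zip_cons_cons, List.all_cons, ih d, pvChain]
    by_cases h : c < d <;> simp [h]

-- ===== VERDICT (by name: the statement is the Claim_ definition above) =====
theorem isLeadsInOrder_spec : Claim_equal_isLeadsInOrder := by
  intro A _
  unfold Spec_isLeadsInOrder isLeadsInOrder isLeadsInOrder_alt
  rw [pvRows_eq]
  cases h : A.filterMap pvLead with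
  | nil => rfl
  | cons c cs =>
    have hc : (0 : Int) ≤ c := by
      have hmem : c ∈ A.filterMap pvLead := by rw [h]; exact List.mem_cons_self
      obtain ⟨row, _, hrow⟩ := List.mem_filterMap.mp hmem
      exact pvLeadGo_ge _ 0 c (by rwa [pvLead] at hrow)
    simp only [List.tail_cons, pvZip_chain, pvChain]
    rw [if_pos (by omega)]
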